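-- pv_equiv track=rewrite | github.com/Neraaz/HTESP | src/htepc.py | extract_elements_with_spin
-- ===== SOURCE A (Python) =====
-- def extract_elements_with_spin(original_list):
--     """
--     Extract elements with their spin values from the given list.
--
--     Parameters:
--     - original_list (list): List containing strings representing elements with spin values.
--
--     Returns:
--     - dict: A dictionary where keys are elements and values are lists of spin values.
--     """
--     elements_with_spin = {}
--     for item in original_list:
--         if ',' in item:
--             element, spin = item.split(',')
--             spin_value = spin.split('=')[1]
--             if element not in elements_with_spin:
--                 elements_with_spin[element] = [spin_value]
--             elif spin_value not in elements_with_spin[element]: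
--                 elements_with_spin[element].append(spin_value)
--     return elements_with_spin
-- ===== SOURCE B (Python) =====
-- def extract_elements_with_spin(original_list):
--     # Stage 1: parse once into a flat list of (element, spin_value) pairs.
--     # Stage 2: group by repeated partitioning on the first remaining key
--     # (no dict membership tests during grouping), deduplicating each group
--     # with dict.fromkeys to keep first-seen order.
--     pairs = []
--     for item in original_list:
--         if ',' in item:
--             element, spin = item.split(',')
--             pairs.append((element, spin.split('=')[1]))
--     result = {}
--     while pairs:
--         key = pairs[0][0]
--         result[key] = list(dict.fromkeys(s for e, s in pairs if e == key))
--         pairs = [(e, s) for e, s in pairs if e != key]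
--     return result
-- ===== Notes on version B (the rewrite author's own statement) =====
-- stated objective: alternative
-- what changed: B replaces A's single pass with inline dict membership/append branching by two stages: a parse pass into a flat (element, spin) pair list, then a group-by implemented as repeated partitioning on the first remaining key (filter its group out, dedup it with dict.fromkeys, recurse on the rest), so no dict lookups or membership tests happen during grouping.
import Mathlib
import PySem

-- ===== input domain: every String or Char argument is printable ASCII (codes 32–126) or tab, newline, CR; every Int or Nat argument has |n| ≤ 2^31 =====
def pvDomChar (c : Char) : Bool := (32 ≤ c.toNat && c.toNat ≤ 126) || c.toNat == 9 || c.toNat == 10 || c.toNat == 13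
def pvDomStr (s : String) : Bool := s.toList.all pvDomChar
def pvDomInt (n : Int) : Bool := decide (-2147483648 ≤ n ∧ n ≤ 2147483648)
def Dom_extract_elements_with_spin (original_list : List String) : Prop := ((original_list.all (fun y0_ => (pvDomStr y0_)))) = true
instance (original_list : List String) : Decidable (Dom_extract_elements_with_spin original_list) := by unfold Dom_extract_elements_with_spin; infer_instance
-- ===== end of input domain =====

-- B replaces A's single membership-branching pass by a parse pass into (element, spin) pairs followed by a group-by via repeated partitioning on the first remaining key (objective: alternative).


-- ===== PORT A =====
def extract_elements_with_spin (original_list : List String) : List (String × List String) :=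
  (original_list.foldl (fun elements_with_spin item =>
    if PySem.Str.isIn "," item then
      let parts := (PySem.Str.split? item ",").getD []
      let element := parts.getD 0 ""
      let spin := parts.getD 1 ""
      let spin_value := ((PySem.Str.split? spin "=").getD []).getD 1 ""
      if elements_with_spin.contains element then
        if (elements_with_spin.getD element []).contains spin_value then elements_with_spin
        else elements_with_spin.modify element [] (fun vs => vs ++ [spin_value])
      else elements_with_spin.insert element [spin_value]
    else elements_with_spin) PySem.Dict.empty).items

-- ===== PORT B =====
-- Stage 1 of B: the parse loop appending (element, spin_value) pairs.
def pvPStep (pairs : List (String × String)) (item : String) : List (String × String) :=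
  if PySem.Str.isIn "," item then
    let parts := (PySem.Str.split? item ",").getD []
    pairs ++ [(parts.getD 0 "", ((PySem.Str.split? (parts.getD 1 "") "=").getD []).getD 1 "")]
  else pairs

def pvParse (original_list : List String) : List (String × String) :=
  original_list.foldl pvPStep []

-- Stage 2 of B: the while loop — take the first remaining key, dedup its group, drop it, repeat.
def pvGroup : List (String × String) → List (String × List String)
  | [] => []
  | p :: rest =>
      (p.1, PySem.List.dedup (((p :: rest).filter (fun q => q.1 == p.1)).map (fun q => q.2))) ::
      pvGroup ((p :: rest).filter (fun q => q.1 != p.1))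
termination_by ps => ps.length
decreasing_by
  simp only [List.filter_cons, bne_self_eq_false, Bool.false_eq_true, if_false]
  exact Nat.lt_succ_of_le (List.length_filter_le _ _)

def extract_elements_with_spin_alt (original_list : List String) : List (String × List String) :=
  pvGroup (pvParse original_list)

-- ===== PRECONDITION & SPEC =====
-- Pre_ excludes exactly the inputs on which the Python A raises: an item containing ',' must
-- contain it exactly once (the two-variable unpacking raises ValueError otherwise) and the part
-- after the comma must contain '=' (spin.split('=')[1] raises IndexError otherwise).
def Pre_extract_elements_with_spin (original_list : List String) : Prop :=
  ∀ item ∈ original_list, PySem.Str.isIn "," item = true →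
    PySem.Str.count item "," = 1 ∧
    PySem.Str.isIn "=" (((PySem.Str.split? item ",").getD []).getD 1 "") = true
instance (original_list : List String) : Decidable (Pre_extract_elements_with_spin original_list) := by
  unfold Pre_extract_elements_with_spin; infer_instance
def pvWitness_extract_elements_with_spin : List String := ["Fe,spin=2", "Fe,spin=2", "Ni,spin=0", "x"]
def Spec_extract_elements_with_spin (original_list : List String) (out : List (String × List String)) : Prop := out = extract_elements_with_spin_alt original_list
instance (original_list : List String) (out : List (String × List String)) : Decidable (Spec_extract_elements_with_spin original_list out) := by unfold Spec_extract_elements_with_spin; infer_instance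

-- ===== CLAIM (what is proved, stated in full; the proofs are below) =====
def Claim_equal_extract_elements_with_spin : Prop := ∀ (original_list : List String), Dom_extract_elements_with_spin original_list → Pre_extract_elements_with_spin original_list → Spec_extract_elements_with_spin original_list (extract_elements_with_spin original_list)

-- ===== LEMMAS AND PROOFS =====

-- spins recorded for key k, in order
def pvSpins (k : String) (ps : List (String × String)) : List String :=
  (ps.filter (fun q => q.1 == k)).map (fun q => q.2)

-- A's loop body, seen on parsed pairs
def pvAStep (d : PySem.Dict String (List String)) (p : String × String) : PySem.Dict String (List String) :=
  if d.contains p.1 then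
    if (d.getD p.1 []).contains p.2 then d
    else d.modify p.1 [] (fun vs => vs ++ [p.2])
  else d.insert p.1 [p.2]

theorem pvSpins_nil (k : String) : pvSpins k [] = [] := rfl

theorem pvSpins_cons (k : String) (p : String × String) (t : List (String × String)) :
    pvSpins k (p :: t) = if p.1 == k then p.2 :: pvSpins k t else pvSpins k t := by
  simp only [pvSpins, List.filter_cons]
  by_cases h : (p.1 == k) = true <;> simp [h]

-- A's step, on a dict with unique keys, is 'modify with ordered-set add'
theorem pvAStep_eq (d : PySem.Dict String (List String)) (h : d.keys.Nodup) (p : String × String) :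
    pvAStep d p = d.modify p.1 [] (fun vs => PySem.Set.add vs p.2) := by
  unfold pvAStep
  by_cases hc : d.contains p.1 = true
  · obtain ⟨vs, hvs⟩ : ∃ vs, d.get? p.1 = some vs := by
      cases hg : d.get? p.1 with
      | none => rw [(PySem.Dict.get?_eq_none_iff_contains d p.1).mp hg] at hc; cases hc
      | some w => exact ⟨w, rfl⟩
    have hgd : d.getD p.1 [] = vs := PySem.Dict.getD_of_get?_eq_some d [] hvs
    by_cases hv : vs.contains p.2 = true
    · rw [if_pos hc, hgd, if_pos hv]
      have hmem : p.2 ∈ vs := by simpa using hv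
      have hmod : d.modify p.1 [] (fun vs => PySem.Set.add vs p.2) = d.insert p.1 vs := by
        simp [PySem.Dict.modify, hgd, PySem.Set.add, PySem.Set.contains, hmem]
      rw [hmod]
      apply PySem.Dict.ext
      rw [PySem.Dict.items_insert_of_contains d _ hc]
      nth_rewrite 1 [← List.map_id d.items]
      apply List.map_congr_left
      intro q hq
      by_cases hqe : (q.1 == p.1) = true
      · have hq1 : q.1 = p.1 := beq_iff_eq.mp hqe
        have hg : d.get? q.1 = some q.2 :=
          (PySem.Dict.get?_eq_some_iff_mem_items d q.1 q.2 h).mpr (by simpa using hq)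
        rw [hq1, hvs] at hg
        have hq2 : q.2 = vs := by injection hg with h'; exact h'.symm
        rw [if_pos hqe, ← hq1, ← hq2]; rfl
      · simp [hqe]
    · have hmem : p.2 ∉ vs := by simpa using hv
      rw [if_pos hc, hgd, if_neg hv]
      simp [PySem.Dict.modify, hgd, PySem.Set.add, PySem.Set.contains, hmem]
  · rw [if_neg hc]
    have hcf : d.contains p.1 = false := by simpa using hc
    have hgd : d.getD p.1 [] = [] := PySem.Dict.getD_of_not_contains d [] hcf
    simp [PySem.Dict.modify, hgd, PySem.Set.add, PySem.Set.contains]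

theorem pv_nodup_modify (d : PySem.Dict String (List String)) (k : String)
    (f : List String → List String) (h : d.keys.Nodup) :
    (d.modify k [] f).keys.Nodup := by
  rw [PySem.Dict.modify]; exact PySem.Dict.nodup_keys_insert d k _ h

-- parse loop: the accumulator only ever grows on the right
theorem pvParse_acc (l : List String) (acc : List (String × String)) :
    l.foldl pvPStep acc = acc ++ l.foldl pvPStep [] := by
  induction l generalizing acc with
  | nil => simp
  | cons x t ih =>
    have hstep : pvPStep acc x = acc ++ pvPStep [] x := by
      unfold pvPStep; split <;> simp
    simp only [List.foldl_cons]
    rw [ih (pvPStep acc x), ih (pvPStep [] x), hstep, List.append_assoc]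

-- A's fold over the raw items is A's step folded over the parsed pairs
theorem pvAfold_parse (l : List String) (d : PySem.Dict String (List String)) :
    l.foldl (fun elements_with_spin item =>
      if PySem.Str.isIn "," item then
        let parts := (PySem.Str.split? item ",").getD []
        let element := parts.getD 0 ""
        let spin := parts.getD 1 ""
        let spin_value := ((PySem.Str.split? spin "=").getD []).getD 1 ""
        if elements_with_spin.contains element then
          if (elements_with_spin.getD element []).contains spin_value then elements_with_spin
          else elements_with_spin.modify element [] (fun vs => vs ++ [spin_value])
        else elements_with_spin.insert element [spin_value]
      else elements_with_spin) d
    = (pvParse l).foldl pvAStep d := by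
  induction l generalizing d with
  | nil => rfl
  | cons x t ih =>
    have hparse : pvParse (x :: t) = pvPStep [] x ++ pvParse t := by
      simp only [pvParse, List.foldl_cons]
      exact pvParse_acc t (pvPStep [] x)
    rw [List.foldl_cons, ih, hparse, List.foldl_append]
    congr 1
    unfold pvPStep
    by_cases hx : PySem.Str.isIn "," x = true
    · rw [if_pos hx, if_pos hx]
      simp [pvAStep]
    · rw [if_neg hx, if_neg hx]
      rfl

-- the 'modify with Set.add' fold from a dict with unique keys keeps keys unique
theorem pv_nodup_fold (ps : List (String × String)) (d : PySem.Dict String (List String))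
    (h : d.keys.Nodup) :
    (ps.foldl (fun d p => d.modify p.1 [] (fun vs => PySem.Set.add vs p.2)) d).keys.Nodup := by
  induction ps generalizing d with
  | nil => exact h
  | cons p t ih => exact ih _ (pv_nodup_modify d p.1 _ h)

theorem pvAStep_fold_eq (ps : List (String × String)) (d : PySem.Dict String (List String))
    (h : d.keys.Nodup) :
    ps.foldl pvAStep d = ps.foldl (fun d p => d.modify p.1 [] (fun vs => PySem.Set.add vs p.2)) d := by
  induction ps generalizing d with
  | nil => rfl
  | cons p t ih =>
    simp only [List.foldl_cons]
    rw [pvAStep_eq d h p, ih _ (pv_nodup_modify d p.1 _ h)]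

-- lookup after the grouping fold: the entry at c is the ordered-dedup fold of its spins
theorem pvAfold_getD (ps : List (String × String)) (d : PySem.Dict String (List String)) (c : String) :
    (ps.foldl (fun d p => d.modify p.1 [] (fun vs => PySem.Set.add vs p.2)) d).getD c []
    = PySem.Set.update (d.getD c []) (pvSpins c ps) := by
  induction ps generalizing d with
  | nil => simp [pvSpins_nil, PySem.Set.update]
  | cons p t ih =>
    simp only [List.foldl_cons]
    rw [ih, PySem.Dict.getD_modify, pvSpins_cons]
    by_cases he : c = p.1
    · simp [he, PySem.Set.update]
    · have : (p.1 == c) = false := by simp [Ne.symm he]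
      simp [he, this]

-- the per-group dedup of B peels off the head key
theorem pv_foldl_add_mem (xs s : List String) (x : String) (hx : x ∈ s) :
    xs.foldl PySem.Set.add s = (xs.filter (fun y => y != x)).foldl PySem.Set.add s := by
  induction xs generalizing s with
  | nil => rfl
  | cons y t ih =>
    simp only [List.foldl_cons, List.filter_cons]
    by_cases hyx : (y != x) = true
    · simp only [hyx, if_true, List.foldl_cons]
      refine ih _ ?_
      unfold PySem.Set.add
      split
      · exact hx
      · exact List.mem_append_left _ hx
    · have hy : y = x := by simpa using hyx
      have : PySem.Set.add s y = s := by
        simp [PySem.Set.add, PySem.Set.contains, hy, hx]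
      simp only [hyx, if_false, this, Bool.false_eq_true]
      exact ih s hx
theorem pv_foldl_add_cons (ys s : List String) (x : String) (hx : ∀ y ∈ ys, y ≠ x) :
    ys.foldl PySem.Set.add (x :: s) = x :: ys.foldl PySem.Set.add s := by
  induction ys generalizing s with
  | nil => rfl
  | cons y t ih =>
    have hyx : y ≠ x := hx y (by simp)
    have hcons : PySem.Set.add (x :: s) y = x :: PySem.Set.add s y := by
      by_cases hys : y ∈ s
      · simp [PySem.Set.add, PySem.Set.contains, hys, hyx]
      · simp [PySem.Set.add, PySem.Set.contains, hys, hyx]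
    simp only [List.foldl_cons, hcons]
    exact ih _ (fun y hy => hx y (by simp [hy]))

theorem pv_dedup_cons (x : String) (xs : List String) :
    PySem.List.dedup (x :: xs) = x :: PySem.List.dedup (xs.filter (fun y => y != x)) := by
  have h0 : PySem.List.dedup (x :: xs) = xs.foldl PySem.Set.add [x] := by
    simp [PySem.List.dedup_eq_ofList, PySem.Set.ofList_eq_foldl, PySem.Set.add,
          PySem.Set.contains]
  rw [h0, pv_foldl_add_mem xs [x] x (by simp),
      pv_foldl_add_cons _ _ _ (fun y hy => by simpa using (List.of_mem_filter hy))]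
  simp [PySem.List.dedup_eq_ofList, PySem.Set.ofList_eq_foldl]

-- characterization of B's partition recursion
theorem pvGroup_char (n : Nat) : ∀ ps : List (String × String), ps.length ≤ n →
    pvGroup ps = (PySem.List.dedup (ps.map (fun q => q.1))).map
      (fun k => (k, PySem.List.dedup (pvSpins k ps))) := by
  induction n with
  | zero =>
    intro ps hps
    have : ps = [] := List.eq_nil_of_length_eq_zero (Nat.le_zero.mp hps)
    subst this
    simp [pvGroup, PySem.List.dedup_eq_ofList, PySem.Set.ofList_eq_foldl]
  | succ n ih =>
    intro ps hps
    match ps with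
    | [] => simp [pvGroup, PySem.List.dedup_eq_ofList, PySem.Set.ofList_eq_foldl]
    | p :: rest =>
      rw [pvGroup]
      have hdrop : (p :: rest).filter (fun q => q.1 != p.1) = rest.filter (fun q => q.1 != p.1) := by
        simp
      set rf := rest.filter (fun q => q.1 != p.1) with hrf
      have hlen : rf.length ≤ n := by
        rw [hrf]
        have := List.length_filter_le (fun q => q.1 != p.1) rest
        simp only [List.length_cons] at hps
        omega
      rw [hdrop, ih rf hlen]
      have hkeys : PySem.List.dedup ((p :: rest).map (fun q => q.1))
          = p.1 :: PySem.List.dedup (rf.map (fun q => q.1)) := by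
        rw [List.map_cons, pv_dedup_cons]
        congr 1
        rw [hrf, List.filter_map]
        rfl
      rw [hkeys, List.map_cons]
      congr 1
      apply List.map_congr_left
      intro k hk
      have hkne : k ≠ p.1 := by
        rcases List.mem_map.mp ((PySem.List.mem_dedup _ k).mp hk) with ⟨q, hq, hqk⟩
        have := List.of_mem_filter hq
        subst hqk; simpa using this
      have hsp : pvSpins k (p :: rest) = pvSpins k rest := by
        rw [pvSpins_cons, if_neg (by simp [hkne.symm])]
      have hsp2 : pvSpins k rf = pvSpins k rest := by
        simp only [pvSpins, hrf, List.filter_filter]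
        congr 1
        apply List.filter_congr
        intro q _
        by_cases hqk : (q.1 == k) = true
        · have : q.1 = k := beq_iff_eq.mp hqk
          simp [this, hkne]
        · simp [hqk]
      rw [hsp, hsp2]

-- ===== VERDICT (by name: the statement is the Claim_ definition above) =====
theorem extract_elements_with_spin_spec : Claim_equal_extract_elements_with_spin := by
  intro l _ _
  unfold Spec_extract_elements_with_spin extract_elements_with_spin extract_elements_with_spin_alt
  rw [pvAfold_parse, pvAStep_fold_eq _ _ (by simp)]
  set ps := pvParse l with hps
  have hnd : ((ps.foldl (fun d p => d.modify p.1 [] (fun vs => PySem.Set.add vs p.2))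
      PySem.Dict.empty)).keys.Nodup :=
    pv_nodup_fold ps PySem.Dict.empty (by simp)
  rw [PySem.Dict.items_eq_map_keys _ hnd ([] : List String)]
  rw [PySem.Dict.keys_foldl_modify_key]
  rw [pvGroup_char ps.length ps (Nat.le_refl _)]
  have hkeys : PySem.Set.update (PySem.Dict.empty : PySem.Dict String (List String)).keys (ps.map (fun p => p.1))
      = PySem.List.dedup (ps.map (fun q => q.1)) := by
    simp [PySem.Dict.keys_empty, PySem.Set.update, PySem.List.dedup_eq_ofList,
          PySem.Set.ofList_eq_foldl]
  rw [hkeys]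
  apply List.map_congr_left
  intro k _
  rw [pvAfold_getD]
  simp [PySem.Dict.getD_empty, PySem.Set.update, PySem.List.dedup_eq_ofList,
        PySem.Set.ofList_eq_foldl]
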